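-- pv_equiv track=rewrite | github.com/lx-0/pixel-realm | scripts/gen_multiplayer_ui_assets.py | gen_minimap_dot
-- ===== SOURCE A (Python) =====
-- _ = (0, 0, 0, 0)          # transparent
--
-- K   = (13,  13,  13,  255)  # shadow black / outline
--
-- NW  = (240, 240, 240, 255)  # near white
--
-- def blank(w, h, fill=_):
--     return [[fill] * w for _ in range(h)]
--
-- def set_pixel(grid, x, y, color):
--     if 0 <= y < len(grid) and 0 <= x < len(grid[0]):
--         grid[y][x] = color
--
-- def draw_circle_filled(grid, cx, cy, r, color):
--     for dy in range(-r, r + 1):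
--         for dx in range(-r, r + 1):
--             if dx * dx + dy * dy <= r * r:
--                 set_pixel(grid, cx + dx, cy + dy, color)
--
-- def gen_minimap_dot(outer_color, inner_color, highlight=NW):
--     """8×8 minimap player dot."""
--     g = blank(8, 8)
--
--     draw_circle_filled(g, 4, 4, 3, outer_color)
--     draw_circle_filled(g, 4, 4, 2, inner_color)
--     set_pixel(g, 3, 3, highlight)
--
--     # Outline
--     for dy in range(-4, 5):
--         for dx in range(-4, 5):
--             dist = dx * dx + dy * dy
--             if 9 <= dist <= 16:
--                 set_pixel(g, 4 + dx, 4 + dy, K)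
--
--     return g
-- ===== SOURCE B (Python) =====
-- _ = (0, 0, 0, 0)
-- K = (13, 13, 13, 255)
-- NW = (240, 240, 240, 255)
--
-- def _pixel(x, y, outer_color, inner_color, highlight):
--     dist = (x - 4) ** 2 + (y - 4) ** 2
--     if 9 <= dist <= 16:
--         return K
--     if (x, y) == (3, 3):
--         return highlight
--     if dist <= 4:
--         return inner_color
--     if dist <= 8:
--         return outer_color
--     return _
--
-- def gen_minimap_dot(outer_color, inner_color, highlight=NW):
--     """8x8 minimap player dot (single pass, per-pixel priority)."""
--     return [[_pixel(x, y, outer_color, inner_color, highlight)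
--              for x in range(8)] for y in range(8)]
-- ===== Notes on version B (the rewrite author's own statement) =====
-- stated objective: simpler
-- what changed: Replaces A's sequence of mutating layer passes (blank grid, two filled-circle painters, highlight pixel, outline loop) by a single comprehension that assigns each of the 64 pixels once from a per-pixel distance/priority rule reproducing A's last-write order.
import Mathlib
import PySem

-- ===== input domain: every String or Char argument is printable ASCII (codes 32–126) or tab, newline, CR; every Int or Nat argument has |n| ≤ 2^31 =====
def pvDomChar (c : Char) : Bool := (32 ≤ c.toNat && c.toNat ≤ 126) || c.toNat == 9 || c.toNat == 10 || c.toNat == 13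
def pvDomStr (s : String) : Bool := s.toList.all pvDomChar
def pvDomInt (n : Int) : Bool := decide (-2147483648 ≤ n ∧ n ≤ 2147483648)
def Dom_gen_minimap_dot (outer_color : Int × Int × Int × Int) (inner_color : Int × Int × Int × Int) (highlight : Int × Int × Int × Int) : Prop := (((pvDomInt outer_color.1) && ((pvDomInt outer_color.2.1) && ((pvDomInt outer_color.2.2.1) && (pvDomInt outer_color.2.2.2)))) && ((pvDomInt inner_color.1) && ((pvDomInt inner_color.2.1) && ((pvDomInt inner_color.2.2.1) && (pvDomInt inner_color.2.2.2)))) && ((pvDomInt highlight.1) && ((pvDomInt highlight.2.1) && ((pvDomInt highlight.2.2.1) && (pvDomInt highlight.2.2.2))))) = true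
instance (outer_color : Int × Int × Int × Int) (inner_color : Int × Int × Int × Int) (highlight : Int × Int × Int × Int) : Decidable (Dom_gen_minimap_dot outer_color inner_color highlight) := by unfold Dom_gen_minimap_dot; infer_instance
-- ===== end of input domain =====

-- ===== PORT A =====
-- One honest line: B replaces A's layered circle-painting passes by a single per-pixel
-- priority rule (simpler decomposition); A mutates only its local grid, no caller-visible effects.
def pvT : Int × Int × Int × Int := (0, 0, 0, 0)
def pvK : Int × Int × Int × Int := (13, 13, 13, 255)

def pv_blank (w h : Int) (fill : Int × Int × Int × Int) : List (List (Int × Int × Int × Int)) :=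
  (PySem.List.pyRange 0 h 1).map (fun _ => List.replicate w.toNat fill)

def pv_set_pixel (g : List (List (Int × Int × Int × Int))) (x y : Int)
    (c : Int × Int × Int × Int) : List (List (Int × Int × Int × Int)) :=
  if 0 ≤ y ∧ y < (g.length : Int) ∧ 0 ≤ x ∧ x < ((g.headD []).length : Int) then
    g.set y.toNat ((g.getD y.toNat []).set x.toNat c)
  else g

def pv_draw_circle_filled (g : List (List (Int × Int × Int × Int))) (cx cy r : Int)
    (c : Int × Int × Int × Int) : List (List (Int × Int × Int × Int)) :=
  (PySem.List.pyRange (-r) (r + 1) 1).foldl (fun g dy =>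
    (PySem.List.pyRange (-r) (r + 1) 1).foldl (fun g dx =>
      if dx * dx + dy * dy ≤ r * r then pv_set_pixel g (cx + dx) (cy + dy) c else g) g) g

def gen_minimap_dot (outer_color : Int × Int × Int × Int) (inner_color : Int × Int × Int × Int) (highlight : Int × Int × Int × Int) : List (List (Int × Int × Int × Int)) :=
  let g := pv_blank 8 8 pvT
  let g := pv_draw_circle_filled g 4 4 3 outer_color
  let g := pv_draw_circle_filled g 4 4 2 inner_color
  let g := pv_set_pixel g 3 3 highlight
  (PySem.List.pyRange (-4) 5 1).foldl (fun g dy =>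
    (PySem.List.pyRange (-4) 5 1).foldl (fun g dx =>
      let dist := dx * dx + dy * dy
      if 9 ≤ dist ∧ dist ≤ 16 then pv_set_pixel g (4 + dx) (4 + dy) pvK else g) g) g

-- ===== PORT B =====
def pv_pixel (x y : Int) (outer_color inner_color highlight : Int × Int × Int × Int) :
    Int × Int × Int × Int :=
  let dist := (x - 4) ^ 2 + (y - 4) ^ 2
  if 9 ≤ dist ∧ dist ≤ 16 then pvK
  else if x = 3 ∧ y = 3 then highlight
  else if dist ≤ 4 then inner_color
  else if dist ≤ 8 then outer_color
  else pvT

def gen_minimap_dot_alt (outer_color : Int × Int × Int × Int) (inner_color : Int × Int × Int × Int) (highlight : Int × Int × Int × Int) : List (List (Int × Int × Int × Int)) :=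
  (PySem.List.pyRange 0 8 1).map (fun y =>
    (PySem.List.pyRange 0 8 1).map (fun x => pv_pixel x y outer_color inner_color highlight))

-- ===== PRECONDITION & SPEC =====
def Spec_gen_minimap_dot (outer_color : Int × Int × Int × Int) (inner_color : Int × Int × Int × Int) (highlight : Int × Int × Int × Int) (out : List (List (Int × Int × Int × Int))) : Prop := out = gen_minimap_dot_alt outer_color inner_color highlight
instance (outer_color : Int × Int × Int × Int) (inner_color : Int × Int × Int × Int) (highlight : Int × Int × Int × Int) (out : List (List (Int × Int × Int × Int))) : Decidable (Spec_gen_minimap_dot outer_color inner_color highlight out) := by unfold Spec_gen_minimap_dot; infer_instance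

-- ===== CLAIM (what is proved, stated in full; the proofs are below) =====
def Claim_equal_gen_minimap_dot : Prop := ∀ (outer_color : Int × Int × Int × Int) (inner_color : Int × Int × Int × Int) (highlight : Int × Int × Int × Int), Dom_gen_minimap_dot outer_color inner_color highlight → Spec_gen_minimap_dot outer_color inner_color highlight (gen_minimap_dot outer_color inner_color highlight)

-- ===== LEMMAS AND PROOFS =====
-- Both programs choose each pixel's color by position only, never by inspecting the color
-- values; so each commutes with a color substitution. We prove that naturality, then
-- compare the two ports at distinguishable "tag" colors by kernel computation.

def pvInterp (o i h c : Int × Int × Int × Int) : Int × Int × Int × Int :=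
  if c = (1, 0, 0, 0) then o else if c = (2, 0, 0, 0) then i
  else if c = (3, 0, 0, 0) then h else c

theorem pv_getD_map (f : List (Int × Int × Int × Int) → List (Int × Int × Int × Int))
    (hf : f [] = []) (g : List (List (Int × Int × Int × Int))) (n : Nat) :
    (g.map f).getD n [] = f (g.getD n []) := by
  simp only [List.getD, List.getElem?_map]
  cases g[n]? <;> simp [hf]

theorem pv_headD_map (f : List (Int × Int × Int × Int) → List (Int × Int × Int × Int))
    (hf : f [] = []) (g : List (List (Int × Int × Int × Int))) :
    (g.map f).headD [] = f (g.headD []) := by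
  cases g <;> simp [hf]

theorem pv_set_pixel_map (f : (Int × Int × Int × Int) → (Int × Int × Int × Int))
    (g : List (List (Int × Int × Int × Int))) (x y : Int) (c : Int × Int × Int × Int) :
    (pv_set_pixel g x y c).map (List.map f) = pv_set_pixel (g.map (List.map f)) x y (f c) := by
  unfold pv_set_pixel
  have hlen : ((g.map (List.map f)).headD []).length = (g.headD []).length := by
    rw [pv_headD_map (List.map f) rfl]; simp
  rw [hlen]
  simp only [List.length_map]
  split_ifs with hcond
  · rw [List.map_set, List.map_set, pv_getD_map (List.map f) rfl]
  · rfl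

theorem pv_map_foldl {α β : Type} (f : β → β) (step step' : β → α → β)
    (hs : ∀ g a, f (step g a) = step' (f g) a) :
    ∀ (l : List α) (g : β), f (l.foldl step g) = l.foldl step' (f g) := by
  intro l
  induction l with
  | nil => intro g; rfl
  | cons a t ih => intro g; simp only [List.foldl_cons, ih, hs]

theorem pv_draw_map (f : (Int × Int × Int × Int) → (Int × Int × Int × Int))
    (g : List (List (Int × Int × Int × Int))) (cx cy r : Int) (c : Int × Int × Int × Int) :
    (pv_draw_circle_filled g cx cy r c).map (List.map f)
      = pv_draw_circle_filled (g.map (List.map f)) cx cy r (f c) := by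
  unfold pv_draw_circle_filled
  refine pv_map_foldl _ _ _ (fun g dy => ?_) _ _
  refine pv_map_foldl _ _ _ (fun g dx => ?_) _ _
  by_cases hc : dx * dx + dy * dy ≤ r * r <;> simp [hc, pv_set_pixel_map]

theorem pv_blank_map (f : (Int × Int × Int × Int) → (Int × Int × Int × Int))
    (w h : Int) (fill : Int × Int × Int × Int) :
    (pv_blank w h fill).map (List.map f) = pv_blank w h (f fill) := by
  simp [pv_blank]

theorem pv_A_map (f : (Int × Int × Int × Int) → (Int × Int × Int × Int))
    (hT : f pvT = pvT) (hK : f pvK = pvK) (a b c : Int × Int × Int × Int) :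
    (gen_minimap_dot a b c).map (List.map f) = gen_minimap_dot (f a) (f b) (f c) := by
  unfold gen_minimap_dot
  have houtline :
      ∀ (g : List (List (Int × Int × Int × Int))),
        ((PySem.List.pyRange (-4) 5 1).foldl (fun g dy =>
          (PySem.List.pyRange (-4) 5 1).foldl (fun g dx =>
            let dist := dx * dx + dy * dy
            if 9 ≤ dist ∧ dist ≤ 16 then pv_set_pixel g (4 + dx) (4 + dy) pvK else g) g) g).map
            (List.map f)
          = (PySem.List.pyRange (-4) 5 1).foldl (fun g dy =>
              (PySem.List.pyRange (-4) 5 1).foldl (fun g dx =>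
                let dist := dx * dx + dy * dy
                if 9 ≤ dist ∧ dist ≤ 16 then pv_set_pixel g (4 + dx) (4 + dy) pvK else g) g)
              (g.map (List.map f)) := by
    intro g
    refine pv_map_foldl _ _ _ (fun g dy => ?_) _ _
    refine pv_map_foldl _ _ _ (fun g dx => ?_) _ _
    by_cases hc : 9 ≤ dx * dx + dy * dy ∧ dx * dx + dy * dy ≤ 16 <;>
      simp [hc, pv_set_pixel_map, hK]
  rw [houtline, pv_set_pixel_map, pv_draw_map, pv_draw_map, pv_blank_map, hT]

theorem pv_B_map (o i h : Int × Int × Int × Int) (x y : Int) :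
    pvInterp o i h (pv_pixel x y (1, 0, 0, 0) (2, 0, 0, 0) (3, 0, 0, 0))
      = pv_pixel x y o i h := by
  unfold pv_pixel
  dsimp only
  split_ifs <;> rfl

theorem pv_interp_T (o i h : Int × Int × Int × Int) : pvInterp o i h pvT = pvT := rfl

theorem pv_interp_K (o i h : Int × Int × Int × Int) : pvInterp o i h pvK = pvK := rfl

set_option maxRecDepth 10000 in
theorem pv_tag_eq :
    gen_minimap_dot (1, 0, 0, 0) (2, 0, 0, 0) (3, 0, 0, 0)
      = gen_minimap_dot_alt (1, 0, 0, 0) (2, 0, 0, 0) (3, 0, 0, 0) := by decide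

-- ===== VERDICT (by name: the statement is the Claim_ definition above) =====
theorem gen_minimap_dot_spec : Claim_equal_gen_minimap_dot := by
  intro o i h _
  show gen_minimap_dot o i h = gen_minimap_dot_alt o i h
  have hA := pv_A_map (pvInterp o i h) (pv_interp_T o i h) (pv_interp_K o i h)
    (1, 0, 0, 0) (2, 0, 0, 0) (3, 0, 0, 0)
  have e1 : pvInterp o i h (1, 0, 0, 0) = o := rfl
  have e2 : pvInterp o i h (2, 0, 0, 0) = i := rfl
  have e3 : pvInterp o i h (3, 0, 0, 0) = h := rfl
  rw [e1, e2, e3] at hA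
  have hB : (gen_minimap_dot_alt (1, 0, 0, 0) (2, 0, 0, 0) (3, 0, 0, 0)).map
      (List.map (pvInterp o i h)) = gen_minimap_dot_alt o i h := by
    unfold gen_minimap_dot_alt
    simp [List.map_map, Function.comp_def, pv_B_map]
  rw [← hA, pv_tag_eq, hB]
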